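-- pv_equiv track=rewrite | github.com/lubianat/taxon2wikipedia | src/taxon2wikipedia/process_reflora.py | render_list_without_dict
-- ===== SOURCE A (Python) =====
-- def render_list_without_dict(list_of_names):
--     text = ""
--     for i, name in enumerate(list_of_names):
--         if i == 0:
--             text = text + name
--         elif i == len(list_of_names) - 1:
--             text = text + " e " + name
--         else:
--             text = text + ", " + name
--     return text
-- ===== SOURCE B (Python) =====
-- def render_list_without_dict(list_of_names):
--     if not list_of_names:
--         return ""
--     if len(list_of_names) == 1:
--         return list_of_names[0]
--     return ", ".join(list_of_names[:-1]) + " e " + list_of_names[-1]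
-- ===== Notes on version B (the rewrite author's own statement) =====
-- stated objective: idiomatic
-- what changed: Replaces A's enumerate loop with per-index first/middle/last branching by guards for the empty and singleton lists plus a single ', '.join over list_of_names[:-1] concatenated with ' e ' and the last element.
import Mathlib
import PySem

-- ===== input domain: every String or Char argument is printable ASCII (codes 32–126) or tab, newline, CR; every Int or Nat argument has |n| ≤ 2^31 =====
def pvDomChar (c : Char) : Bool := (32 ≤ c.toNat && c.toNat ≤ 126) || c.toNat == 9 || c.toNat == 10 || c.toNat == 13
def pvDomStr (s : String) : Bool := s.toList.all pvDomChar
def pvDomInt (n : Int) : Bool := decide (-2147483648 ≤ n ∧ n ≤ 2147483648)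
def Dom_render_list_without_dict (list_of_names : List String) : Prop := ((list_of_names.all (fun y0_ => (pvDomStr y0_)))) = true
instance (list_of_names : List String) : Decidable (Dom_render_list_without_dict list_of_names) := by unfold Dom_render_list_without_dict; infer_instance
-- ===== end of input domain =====

-- B replaces A's fold with index-based first/middle/last branching by guards for the
-- empty and singleton cases plus one ', '.join over the slice [:-1] and a ' e ' + last append (idiomatic).

-- ===== PORT A =====
-- literal port of A: fold over enumerate(list_of_names) with the three index branches
def render_list_without_dict (list_of_names : List String) : String :=
  (PySem.List.enumerate list_of_names).foldl
    (fun text p =>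
      if p.1 = 0 then text ++ p.2
      else if p.1 = (list_of_names.length : Int) - 1 then text ++ " e " ++ p.2
      else text ++ ", " ++ p.2) ""

-- ===== PORT B =====
-- literal port of B: empty/singleton guards, then ', '.join(l[:-1]) + ' e ' + l[-1]
-- (the .getD "" defaults are unreachable: the guards guarantee the indices are in range)
def render_list_without_dict_alt (list_of_names : List String) : String :=
  if list_of_names.length = 0 then ""
  else if list_of_names.length = 1 then (PySem.List.pyGet? list_of_names 0).getD ""
  else
    PySem.Str.join ", " (PySem.List.slice list_of_names none (some (-1)))
      ++ " e " ++ (PySem.List.pyGet? list_of_names (-1)).getD ""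

-- ===== PRECONDITION & SPEC =====
def Spec_render_list_without_dict (list_of_names : List String) (out : String) : Prop := out = render_list_without_dict_alt list_of_names
instance (list_of_names : List String) (out : String) : Decidable (Spec_render_list_without_dict list_of_names out) := by unfold Spec_render_list_without_dict; infer_instance

-- ===== CLAIM (what is proved, stated in full; the proofs are below) =====
def Claim_equal_render_list_without_dict : Prop := ∀ (list_of_names : List String), Dom_render_list_without_dict list_of_names → Spec_render_list_without_dict list_of_names (render_list_without_dict list_of_names)

-- ===== LEMMAS AND PROOFS =====

-- the middle part ", y1, y2, …" shared by both characterizations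
def pvMids : List String → String
  | [] => ""
  | y :: r => ", " ++ y ++ pvMids r

-- A's fold over a block of middle indices (never 0, never last) only appends ", " + name
theorem pvMids_foldl (m : List String) (n : Int) (s : String) (k : Int)
    (hk : 1 ≤ k) (hn : k + m.length ≤ n - 1) :
    List.foldl
      (fun text (p : Int × String) =>
        if p.1 = 0 then text ++ p.2
        else if p.1 = n - 1 then text ++ " e " ++ p.2
        else text ++ ", " ++ p.2) s (PySem.List.enumerate m k)
      = s ++ pvMids m := by
  induction m generalizing s k with
  | nil => simp [PySem.List.enumerate, pvMids]
  | cons y r ih =>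
    rw [PySem.List.enumerate_cons]
    simp only [List.foldl_cons]
    have h0 : ¬ (k = 0) := by omega
    have h1 : ¬ (k = n - 1) := by simp at hn; omega
    rw [if_neg h0, if_neg h1]
    rw [ih (s ++ ", " ++ y) (k + 1) (by omega) (by simp at hn ⊢; omega)]
    simp [pvMids, String.append_assoc]

-- ', '.join(x :: m) = x followed by the middle part of m
theorem pvJoin_cons (x : String) (m : List String) :
    PySem.Str.join ", " (x :: m) = x ++ pvMids m := by
  induction m generalizing x with
  | nil => simp [PySem.Str.join, PySem.Chars.join_singleton, String.ofList_toList, pvMids]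
  | cons y r ih =>
    have key : ∀ cs : List Char, String.ofList (',' :: ' ' :: cs) = ", " ++ String.ofList cs := by
      intro cs
      rw [show (',' :: ' ' :: cs) = ", ".toList ++ cs from rfl, String.ofList_append,
        String.ofList_toList]
    simp [PySem.Str.join, PySem.Chars.join_cons_cons, String.ofList_append, String.ofList_toList,
      key, pvMids, String.append_assoc] at ih ⊢
    simp [ih]

theorem pvMain (l : List String) : render_list_without_dict l = render_list_without_dict_alt l := by
  match l with
  | [] => rfl
  | [x] =>
    simp [render_list_without_dict, render_list_without_dict_alt, PySem.List.enumerate,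
      PySem.List.pyGet?, PySem.List.pyIdx?]
  | x :: y :: t =>
    obtain ⟨m, z, hmz⟩ : ∃ m z, y :: t = m ++ [z] :=
      ⟨(y :: t).dropLast, (y :: t).getLast (by simp),
        ((y :: t).dropLast_append_getLast (by simp)).symm⟩
    rw [hmz]
    -- B side: guards fail, the slice is x :: m, l[-1] is z
    have hB : render_list_without_dict_alt (x :: (m ++ [z]))
        = (x ++ pvMids m) ++ " e " ++ z := by
      rw [render_list_without_dict_alt]
      rw [if_neg (by simp), if_neg (by simp)]
      have hd : PySem.List.slice (x :: (m ++ [z])) none (some (-1)) = x :: m := by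
        rw [PySem.List.slice_to_neg_one,
          show x :: (m ++ [z]) = (x :: m) ++ [z] from by simp, List.dropLast_concat]
      have hg : PySem.List.pyGet? (x :: (m ++ [z])) (-1) = some z := by
        rw [show x :: (m ++ [z]) = (x :: m) ++ [z] from by simp]
        simp [PySem.List.pyGet?, PySem.List.pyIdx?]
      rw [hd, hg, pvJoin_cons]
      rfl
    -- A side: split the enumeration into head, middles, last
    rw [hB, render_list_without_dict]
    rw [show x :: (m ++ [z]) = (x :: m) ++ [z] from by simp,
      PySem.List.enumerate_append, PySem.List.enumerate_cons]
    simp only [List.foldl_append, List.foldl_cons, List.foldl_nil, PySem.List.enumerate_cons,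
      PySem.List.enumerate_nil, zero_add, if_true]
    rw [pvMids_foldl m ((((x :: m) ++ [z]).length : Int)) ("" ++ x) 1 (by omega)
      (by simp; omega)]
    have hz0 : ¬ (((x :: m).length : Int) = 0) := by simp; omega
    have hz1 : (((x :: m).length : Int) = (((x :: m) ++ [z]).length : Int) - 1) := by
      simp
    rw [if_neg hz0, if_pos hz1]
    simp [String.append_assoc]

-- ===== VERDICT (by name: the statement is the Claim_ definition above) =====
theorem render_list_without_dict_spec : Claim_equal_render_list_without_dict := by
  intro l _
  unfold Spec_render_list_without_dict
  exact pvMain l
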